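-- pv_equiv track=rewrite | github.com/TamirOffen/OptimalChessAgent | GeneticAlgo/GA_training.py | passed_pawn_mult
-- ===== SOURCE A (Python) =====
-- def passed_pawn_mult(board, pawns_array, opponent_pawns_array):
--
--   num_passed_pawns = 0
--   passed_pawns_array = []
--   for pawn_position in pawns_array:
--     is_passed_pawn = True
--     for opponent_pawn_position in opponent_pawns_array:
--       if pawn_position[1] == opponent_pawn_position[1]:
--         if pawn_position[0] < opponent_pawn_position[0]:
--           is_passed_pawn = False
--           break
--       elif pawn_position[1] - 1  == opponent_pawn_position[1]:
--         if pawn_position[0] < opponent_pawn_position[0]: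
--           is_passed_pawn = False
--           break
--       elif pawn_position[1] + 1 == opponent_pawn_position[1]:
--         if pawn_position[0] < opponent_pawn_position[0]:
--           is_passed_pawn = False
--           break
--
--     if is_passed_pawn:
--       num_passed_pawns += 1
--       passed_pawns_array.append(pawn_position)
--
--   return num_passed_pawns, passed_pawns_array
-- ===== SOURCE B (Python) =====
-- def passed_pawn_mult(board, pawns_array, opponent_pawns_array):
--     # max opponent row per file, built in one pass
--     max_row = {}
--     for r, f in opponent_pawns_array:
--         if f not in max_row or max_row[f] < r:
--             max_row[f] = r
--     passed_pawns_array = [p for p in pawns_array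
--                           if all(max_row.get(p[1] + d, p[0]) <= p[0] for d in (-1, 0, 1))]
--     return len(passed_pawns_array), passed_pawns_array
-- ===== Notes on version B (the rewrite author's own statement) =====
-- stated objective: faster
-- what changed: Replaces the nested scan of all opponent pawns per pawn by a one-pass dict of the maximum opponent row per file; each pawn then checks only its three adjacent files.
import Mathlib
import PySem

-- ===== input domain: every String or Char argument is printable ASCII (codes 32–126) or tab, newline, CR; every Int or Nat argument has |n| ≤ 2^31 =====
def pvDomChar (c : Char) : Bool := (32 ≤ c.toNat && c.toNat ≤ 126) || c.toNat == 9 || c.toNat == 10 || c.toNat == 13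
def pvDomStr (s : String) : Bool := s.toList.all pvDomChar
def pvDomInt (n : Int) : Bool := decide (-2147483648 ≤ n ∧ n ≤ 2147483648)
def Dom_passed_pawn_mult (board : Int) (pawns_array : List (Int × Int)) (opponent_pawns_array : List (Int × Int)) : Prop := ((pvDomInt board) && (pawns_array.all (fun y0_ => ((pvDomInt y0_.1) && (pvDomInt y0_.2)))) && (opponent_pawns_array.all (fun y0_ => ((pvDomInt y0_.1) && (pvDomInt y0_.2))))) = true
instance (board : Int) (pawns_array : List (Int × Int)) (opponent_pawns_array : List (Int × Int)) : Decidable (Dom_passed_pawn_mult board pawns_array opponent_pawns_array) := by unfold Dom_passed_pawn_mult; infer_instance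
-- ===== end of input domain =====

-- B replaces A's nested scan of all opponent pawns per pawn by a one-pass max-row-per-file dict (objective: faster).


-- ===== PORT A =====
def aInner (p : Int × Int) : List (Int × Int) → Bool
  | [] => true
  | o :: rest =>
    if p.2 == o.2 then
      (if p.1 < o.1 then false else aInner p rest)
    else if p.2 - 1 == o.2 then
      (if p.1 < o.1 then false else aInner p rest)
    else if p.2 + 1 == o.2 then
      (if p.1 < o.1 then false else aInner p rest)
    else aInner p rest

def passed_pawn_mult (board : Int) (pawns_array : List (Int × Int)) (opponent_pawns_array : List (Int × Int)) : Int × (List (Int × Int)) :=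
  pawns_array.foldl
    (fun acc pawn_position =>
      if aInner pawn_position opponent_pawns_array then
        (acc.1 + 1, acc.2 ++ [pawn_position])
      else acc)
    ((0 : Int), ([] : List (Int × Int)))

-- ===== PORT B =====
-- max opponent row per file: 'if f not in max_row or max_row[f] < r: max_row[f] = r'
def altBuild (opponent_pawns_array : List (Int × Int)) : PySem.Dict Int Int :=
  opponent_pawns_array.foldl
    (fun d o =>
      if (match d.get? o.2 with | none => true | some m => decide (m < o.1)) then d.insert o.2 o.1
      else d)
    PySem.Dict.empty

-- 'all(max_row.get(p[1] + d, p[0]) <= p[0] for d in (-1, 0, 1))'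
def altOk (d : PySem.Dict Int Int) (p : Int × Int) : Bool :=
  [(-1 : Int), 0, 1].all (fun δ => d.getD (p.2 + δ) p.1 ≤ p.1)

def passed_pawn_mult_alt (board : Int) (pawns_array : List (Int × Int)) (opponent_pawns_array : List (Int × Int)) : Int × (List (Int × Int)) :=
  let max_row := altBuild opponent_pawns_array
  let passed := pawns_array.filter (altOk max_row)
  ((passed.length : Int), passed)

-- ===== PRECONDITION & SPEC =====
def Spec_passed_pawn_mult (board : Int) (pawns_array : List (Int × Int)) (opponent_pawns_array : List (Int × Int)) (out : Int × (List (Int × Int))) : Prop := out = passed_pawn_mult_alt board pawns_array opponent_pawns_array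
instance (board : Int) (pawns_array : List (Int × Int)) (opponent_pawns_array : List (Int × Int)) (out : Int × (List (Int × Int))) : Decidable (Spec_passed_pawn_mult board pawns_array opponent_pawns_array out) := by unfold Spec_passed_pawn_mult; infer_instance

-- ===== CLAIM (what is proved, stated in full; the proofs are below) =====
def Claim_equal_passed_pawn_mult : Prop := ∀ (board : Int) (pawns_array : List (Int × Int)) (opponent_pawns_array : List (Int × Int)), Dom_passed_pawn_mult board pawns_array opponent_pawns_array → Spec_passed_pawn_mult board pawns_array opponent_pawns_array (passed_pawn_mult board pawns_array opponent_pawns_array)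

-- ===== LEMMAS AND PROOFS =====

-- A's inner loop is an 'all' over the opponent list
theorem aInner_eq_all (p : Int × Int) (opps : List (Int × Int)) :
    aInner p opps = opps.all (fun o =>
      !((decide (p.2 = o.2) || decide (p.2 - 1 = o.2) || decide (p.2 + 1 = o.2)) && decide (p.1 < o.1))) := by
  induction opps with
  | nil => rfl
  | cons o rest ih =>
    simp only [aInner, List.all_cons, ih, beq_iff_eq]
    by_cases h1 : p.2 = o.2 <;> by_cases h2 : p.2 - 1 = o.2 <;> by_cases h3 : p.2 + 1 = o.2 <;>
      by_cases h4 : p.1 < o.1 <;>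
      simp [h1, h2, h3, h4]

-- the max-per-file dict answers the per-file 'no opponent row above r' question
theorem altBuild_getD_le (opps : List (Int × Int)) (d : PySem.Dict Int Int) (f r : Int) :
    ((opps.foldl
      (fun d o =>
        if (match d.get? o.2 with | none => true | some m => decide (m < o.1)) then d.insert o.2 o.1
        else d) d).getD f r ≤ r)
    ↔ ((∀ o ∈ opps, ¬(o.2 = f ∧ r < o.1)) ∧ d.getD f r ≤ r) := by
  induction opps generalizing d with
  | nil => simp
  | cons o rest ih =>
    simp only [List.foldl_cons, List.mem_cons, ih]
    have step :
        ((if (match d.get? o.2 with | none => true | some m => decide (m < o.1)) then d.insert o.2 o.1 else d).getD f r ≤ r)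
        ↔ (¬(o.2 = f ∧ r < o.1) ∧ d.getD f r ≤ r) := by
      by_cases hf : o.2 = f
      · subst hf
        rcases hm : d.get? o.2 with _ | m
        · simp [PySem.Dict.getD_insert_self, PySem.Dict.getD_of_get?_eq_none d r hm]
        · have hdr := PySem.Dict.getD_of_get?_eq_some d r hm
          by_cases hlt : m < o.1
          · simp [hlt, PySem.Dict.getD_insert_self, hdr]
            omega
          · simp [hlt, hdr]
            omega
      · have hne : f ≠ o.2 := fun h => hf h.symm
        have heq : (if (match d.get? o.2 with | none => true | some m => decide (m < o.1)) then d.insert o.2 o.1 else d).getD f r = d.getD f r := by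
          rcases hm : d.get? o.2 with _ | m
          · simp [PySem.Dict.getD_insert_of_ne d o.1 r hne]
          · by_cases hlt : m < o.1 <;> simp [hlt, PySem.Dict.getD_insert_of_ne d o.1 r hne]
        rw [heq]
        simp [hf]
    rw [step]
    constructor
    · intro ⟨h1, h2, h3⟩
      refine ⟨fun x hx => ?_, h3⟩
      rcases hx with rfl | hx
      · exact h2
      · exact h1 x hx
    · intro ⟨h1, h2⟩
      exact ⟨fun x hx => h1 x (Or.inr hx), h1 o (Or.inl rfl), h2⟩

-- the two per-pawn tests agree
theorem ok_eq (opps : List (Int × Int)) (p : Int × Int) :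
    altOk (altBuild opps) p = aInner p opps := by
  rw [aInner_eq_all]
  apply Bool.eq_iff_iff.mpr
  simp only [altOk, altBuild, List.all_eq_true, List.mem_cons, List.not_mem_nil, or_false,
    decide_eq_true_eq]
  constructor
  · intro h o ho
    have h1 := ((altBuild_getD_le opps PySem.Dict.empty (p.2 + -1) p.1).mp (h _ (Or.inl rfl))).1 o ho
    have h2 := ((altBuild_getD_le opps PySem.Dict.empty (p.2 + 0) p.1).mp (h _ (Or.inr (Or.inl rfl)))).1 o ho
    have h3 := ((altBuild_getD_le opps PySem.Dict.empty (p.2 + 1) p.1).mp (h _ (Or.inr (Or.inr rfl)))).1 o ho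
    simp only [Bool.not_eq_true', Bool.and_eq_false_iff, Bool.or_eq_false_iff,
      decide_eq_false_iff_not]
    omega
  · intro h δ hδ
    rw [altBuild_getD_le]
    refine ⟨fun o ho => ?_, by simp⟩
    have ho := h o ho
    simp only [Bool.not_eq_true', Bool.and_eq_false_iff, Bool.or_eq_false_iff,
      decide_eq_false_iff_not] at ho
    rcases hδ with rfl | rfl | rfl <;> omega

-- A's outer loop with its (count, list) state is length-of-filter and filter
theorem foldl_count_append (q : Int × Int → Bool) (l : List (Int × Int)) (n : Int) (acc : List (Int × Int)) :
    l.foldl (fun s p => if q p then (s.1 + 1, s.2 ++ [p]) else s) (n, acc)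
    = (n + ((l.filter q).length : Int), acc ++ l.filter q) := by
  induction l generalizing n acc with
  | nil => simp
  | cons x xs ih =>
    by_cases h : q x <;> simp [h, ih] <;> omega

-- ===== VERDICT (by name: the statement is the Claim_ definition above) =====
theorem passed_pawn_mult_spec : Claim_equal_passed_pawn_mult := by
  intro board pawns opps _
  show passed_pawn_mult board pawns opps = passed_pawn_mult_alt board pawns opps
  simp only [passed_pawn_mult, passed_pawn_mult_alt, ← ok_eq]
  rw [foldl_count_append]
  simp
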